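-- pv_equiv track=rewrite | github.com/jax-ml/jax | jax/_src/api_util.py | rebase_donate_argnums
-- ===== SOURCE A (Python) =====
-- from typing import Any, Dict, Iterable, Sequence, Set, Tuple, Union, Optional
--
-- def rebase_donate_argnums(donate_argnums, static_argnums) -> Tuple[int, ...]:
--   """Shifts donate to account for static.
--
--   >>> rebase_donate_argnums((3, 4), (0, 1))
--   (1, 2)
--
--   Args:
--     donate_argnums: An iterable of ints.
--     static_argnums: An iterable of ints.
--
--   Returns:
--     A tuple of unique, sorted integer values based on donate_argnums with each
--     element offset to account for static_argnums.
--   """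
--   if not (static_argnums or donate_argnums):
--     return tuple(sorted(donate_argnums))
--
--   static_argnums = sorted(set(static_argnums))
--   donate_argnums = sorted(set(donate_argnums))
--   i = j = o = 0
--   out = []
--   while j < len(donate_argnums):
--     if i < len(static_argnums) and static_argnums[i] == donate_argnums[j]:
--       raise ValueError(f"`static_argnums` {static_argnums} and "
--                        f"`donate_argnums` {donate_argnums} cannot intersect.")
--
--     if i < len(static_argnums) and static_argnums[i] < donate_argnums[j]:
--       o += 1
--       i += 1
--     else:
--       out.append(donate_argnums[j] - o)
--       j += 1
--   return tuple(out)
-- ===== SOURCE B (Python) =====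
-- def rebase_donate_argnums(donate_argnums, static_argnums):
--   static_argnums = sorted(set(static_argnums))
--   donate_argnums = sorted(set(donate_argnums))
--   static_set = set(static_argnums)
--   if any(d in static_set for d in donate_argnums):
--     raise ValueError(f"`static_argnums` {static_argnums} and "
--                      f"`donate_argnums` {donate_argnums} cannot intersect.")
--   return tuple(d - sum(1 for s in static_argnums if s < d) for d in donate_argnums)
-- ===== Notes on version B (the rewrite author's own statement) =====
-- stated objective: simpler
-- what changed: Replaces the stateful two-pointer merge loop (indices i/j and running offset o) by an up-front set-membership intersection check plus a direct per-element formula: each donated index minus the count of static indices strictly below it.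
import Mathlib
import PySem

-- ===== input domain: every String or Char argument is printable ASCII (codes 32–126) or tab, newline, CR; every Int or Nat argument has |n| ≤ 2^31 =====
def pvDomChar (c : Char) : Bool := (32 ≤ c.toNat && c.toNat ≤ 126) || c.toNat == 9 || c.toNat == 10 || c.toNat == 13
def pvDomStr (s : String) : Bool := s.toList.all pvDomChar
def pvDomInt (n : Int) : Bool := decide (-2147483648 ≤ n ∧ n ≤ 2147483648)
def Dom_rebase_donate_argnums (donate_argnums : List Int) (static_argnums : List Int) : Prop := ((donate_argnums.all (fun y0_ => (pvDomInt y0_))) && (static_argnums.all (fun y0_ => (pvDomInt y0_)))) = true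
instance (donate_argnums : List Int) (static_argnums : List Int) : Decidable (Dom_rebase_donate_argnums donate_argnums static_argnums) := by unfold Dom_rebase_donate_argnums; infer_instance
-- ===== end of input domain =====

-- B replaces A's two-pointer merge by an intersection check plus a per-element
-- "subtract the number of smaller static indices" formula (objective: simpler).

-- ===== PORT A =====
-- A's while loop over indices i/j with offset o, as structural recursion on the
-- suffixes of the two sorted lists (o increments exactly when i does).
-- The `raise ValueError` branch is modelled as `none` (excluded by Pre_).
def pyAloop (ss ds : List Int) (o : Int) : Option (List Int) :=
  match ds with
  | [] => some []
  | d :: ds' =>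
    match ss with
    | [] => (pyAloop [] ds' o).map (fun t => (d - o) :: t)
    | s :: ss' =>
      if s = d then none
      else if s < d then pyAloop ss' (d :: ds') (o + 1)
      else (pyAloop (s :: ss') ds' o).map (fun t => (d - o) :: t)
termination_by ss.length + ds.length
decreasing_by all_goals (simp; try omega)

def rebase_donate_argnums (donate_argnums : List Int) (static_argnums : List Int) : List Int :=
  if static_argnums = [] ∧ donate_argnums = [] then
    PySem.List.sorted donate_argnums (fun x => x) false
  else
    let ss := PySem.List.sorted (PySem.Set.ofList static_argnums) (fun x => x) false
    let ds := PySem.List.sorted (PySem.Set.ofList donate_argnums) (fun x => x) false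
    (pyAloop ss ds 0).getD []   -- `none` (the raise) is outside Pre_

-- ===== PORT B =====
def rebase_donate_argnums_alt (donate_argnums : List Int) (static_argnums : List Int) : List Int :=
  let ss := PySem.List.sorted (PySem.Set.ofList static_argnums) (fun x => x) false
  let ds := PySem.List.sorted (PySem.Set.ofList donate_argnums) (fun x => x) false
  let sset := PySem.Set.ofList ss
  if ds.any (fun d => PySem.Set.contains sset d) then []   -- Source B raises here (outside Pre_)
  else ds.map (fun d => d - ((ss.countP (fun s => s < d)) : Int))

-- ===== PRECONDITION & SPEC =====
-- Pre_ excludes exactly the inputs where donate_argnums and static_argnums share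
-- an element: there A raises ValueError (and B raises the same ValueError).
def Pre_rebase_donate_argnums (donate_argnums : List Int) (static_argnums : List Int) : Prop :=
  ∀ x ∈ donate_argnums, x ∉ static_argnums
instance (donate_argnums : List Int) (static_argnums : List Int) : Decidable (Pre_rebase_donate_argnums donate_argnums static_argnums) := by unfold Pre_rebase_donate_argnums; infer_instance

def pvWitness_rebase_donate_argnums : List Int × List Int := ([3, 4], [0, 1])

def Spec_rebase_donate_argnums (donate_argnums : List Int) (static_argnums : List Int) (out : List Int) : Prop := out = rebase_donate_argnums_alt donate_argnums static_argnums
instance (donate_argnums : List Int) (static_argnums : List Int) (out : List Int) : Decidable (Spec_rebase_donate_argnums donate_argnums static_argnums out) := by unfold Spec_rebase_donate_argnums; infer_instance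

-- ===== CLAIM (what is proved, stated in full; the proofs are below) =====
def Claim_equal_rebase_donate_argnums : Prop := ∀ (donate_argnums : List Int) (static_argnums : List Int), Dom_rebase_donate_argnums donate_argnums static_argnums → Pre_rebase_donate_argnums donate_argnums static_argnums → Spec_rebase_donate_argnums donate_argnums static_argnums (rebase_donate_argnums donate_argnums static_argnums)

-- ===== LEMMAS AND PROOFS =====
lemma pyAloop_eq (ss ds : List Int) (o : Int) :
    ss.Pairwise (· ≤ ·) → ds.Pairwise (· ≤ ·) → (∀ x ∈ ds, x ∉ ss) →
    pyAloop ss ds o =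
      some (ds.map (fun x => x - o - ((ss.countP (fun s => s < x)) : Int))) := by
  induction ss, ds, o using pyAloop.induct with
  | case1 ss o =>
      intro _ _ _
      simp [pyAloop]
  | case2 o d ds' ih =>
      intro hss hds hdisj
      rw [pyAloop, ih List.Pairwise.nil hds.of_cons (by simp)]
      simp
  | case3 o ds' d ss' =>
      intro hss hds hdisj
      exact absurd ((by simp : d ∈ d :: ss')) (hdisj d (by simp))
  | case4 o d ds' sh ss' hne hlt ih =>
      intro hss hds hdisj
      rw [pyAloop, if_neg hne, if_pos hlt,
        ih hss.of_cons hds (fun x hx hm => hdisj x hx (List.mem_cons_of_mem _ hm))]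
      congr 1
      apply List.map_congr_left
      intro x hx
      have hdx : d ≤ x := by
        rcases List.mem_cons.mp hx with h | h
        · omega
        · exact List.rel_of_pairwise_cons hds h
      have hshx : sh < x := lt_of_lt_of_le hlt hdx
      rw [List.countP_cons_of_pos (by simpa using hshx)]
      push_cast
      ring
  | case5 o d ds' sh ss' hne hnlt ih =>
      intro hss hds hdisj
      rw [pyAloop, if_neg hne, if_neg hnlt,
        ih hss hds.of_cons (fun x hx hm => hdisj x (List.mem_cons_of_mem _ hx) hm)]
      have hz : List.countP (fun s => decide (s < d)) (sh :: ss') = 0 := by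
        rw [List.countP_eq_zero]
        intro a ha
        simp only [decide_eq_true_eq, not_lt]
        rcases List.mem_cons.mp ha with h | h
        · omega
        · have := List.rel_of_pairwise_cons hss h
          omega
      simp [hz]

-- ===== VERDICT (by name: the statement is the Claim_ definition above) =====
theorem rebase_donate_argnums_spec : Claim_equal_rebase_donate_argnums := by
  intro d s _hdom hpre
  unfold Spec_rebase_donate_argnums rebase_donate_argnums rebase_donate_argnums_alt
  by_cases hemp : s = [] ∧ d = []
  · obtain ⟨hs, hd⟩ := hemp
    subst hs; subst hd
    decide
  · rw [if_neg hemp]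
    simp only
    set ss := PySem.List.sorted (PySem.Set.ofList s) (fun x => x) false with hss_def
    set ds := PySem.List.sorted (PySem.Set.ofList d) (fun x => x) false with hds_def
    have hdisj : ∀ x ∈ ds, x ∉ ss := by
      intro x hx hm
      rw [hds_def, PySem.List.mem_sorted, PySem.Set.mem_ofList] at hx
      rw [hss_def, PySem.List.mem_sorted, PySem.Set.mem_ofList] at hm
      exact hpre x hx hm
    have hsorted_ss : ss.Pairwise (· ≤ ·) := by
      have := PySem.List.sorted_pairwise (xs := PySem.Set.ofList s) (key := fun x => x)
      simpa using this
    have hsorted_ds : ds.Pairwise (· ≤ ·) := by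
      have := PySem.List.sorted_pairwise (xs := PySem.Set.ofList d) (key := fun x => x)
      simpa using this
    rw [pyAloop_eq ss ds 0 hsorted_ss hsorted_ds hdisj]
    have hany : (ds.any fun x => PySem.Set.contains (PySem.Set.ofList ss) x) = false := by
      rw [List.any_eq_false]
      intro x hx hc
      rw [PySem.Set.contains_iff, PySem.Set.mem_ofList] at hc
      exact hdisj x hx hc
    rw [hany]
    simp only [Option.getD_some, Bool.false_eq_true, if_false]
    apply List.map_congr_left
    intro x hx
    ring
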